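-- pv_equiv track=rewrite | github.com/Alexarcelo/Pagamentos_Guias_Geral | pages/Pagamentos_Fornecedores.py | filtro_tipo_servico_out_in
-- ===== SOURCE A (Python) =====
-- def filtro_tipo_servico_out_in(lista):
--     encontrou_out = False
--     for item in lista:
--         if item == 'OUT':
--             encontrou_out = True
--         if item == 'IN' and encontrou_out:
--             return True
--     return False
-- ===== SOURCE B (Python) =====
-- def filtro_tipo_servico_out_in(lista):
--     try:
--         i = lista.index('OUT')
--     except ValueError:
--         return False
--     return 'IN' in lista[i+1:]
-- ===== Notes on version B (the rewrite author's own statement) =====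
-- stated objective: simpler
-- what changed: Replaces the flag-threaded single pass with a locate-first-'OUT' (list.index in try/except) followed by a membership test of 'IN' in the remaining suffix.
import Mathlib
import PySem

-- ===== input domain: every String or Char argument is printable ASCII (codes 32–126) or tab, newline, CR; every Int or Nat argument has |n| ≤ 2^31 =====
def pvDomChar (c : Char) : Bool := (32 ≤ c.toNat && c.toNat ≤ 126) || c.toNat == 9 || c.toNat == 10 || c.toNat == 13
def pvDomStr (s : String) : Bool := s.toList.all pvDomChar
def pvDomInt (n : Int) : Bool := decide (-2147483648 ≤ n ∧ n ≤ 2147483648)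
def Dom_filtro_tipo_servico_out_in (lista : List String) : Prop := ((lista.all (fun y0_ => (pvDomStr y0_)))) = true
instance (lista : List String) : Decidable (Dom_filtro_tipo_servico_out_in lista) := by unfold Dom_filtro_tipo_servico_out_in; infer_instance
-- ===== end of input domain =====

-- B replaces A's flag-threaded single pass by: find the first 'OUT', then test 'IN' in the suffix (simpler decomposition).

-- ===== PORT A =====
def filtroGoA : List String → Bool → Bool
  | [], _ => false
  | item :: rest, encontrou_out =>
    let encontrou_out := if item == "OUT" then true else encontrou_out
    if item == "IN" && encontrou_out then true else filtroGoA rest encontrou_out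

def filtro_tipo_servico_out_in (lista : List String) : Bool :=
  filtroGoA lista false

-- ===== PORT B =====
def filtro_tipo_servico_out_in_alt (lista : List String) : Bool :=
  match PySem.List.index? lista "OUT" with
  | none => false
  | some i => (PySem.List.slice lista (some ((i + 1 : Nat) : Int)) none).contains "IN"

-- ===== PRECONDITION & SPEC =====
def Spec_filtro_tipo_servico_out_in (lista : List String) (out : Bool) : Prop := out = filtro_tipo_servico_out_in_alt lista
instance (lista : List String) (out : Bool) : Decidable (Spec_filtro_tipo_servico_out_in lista out) := by unfold Spec_filtro_tipo_servico_out_in; infer_instance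

-- ===== CLAIM (what is proved, stated in full; the proofs are below) =====
def Claim_equal_filtro_tipo_servico_out_in : Prop := ∀ (lista : List String), Dom_filtro_tipo_servico_out_in lista → Spec_filtro_tipo_servico_out_in lista (filtro_tipo_servico_out_in lista)

-- ===== LEMMAS AND PROOFS =====
theorem filtroGoA_true (xs : List String) : filtroGoA xs true = xs.contains "IN" := by
  induction xs with
  | nil => simp [filtroGoA]
  | cons x xs ih =>
    by_cases h : x = "IN" <;> simp [filtroGoA, h, Ne.symm, ih]

theorem filtroGoA_false_eq_alt (xs : List String) :
    filtroGoA xs false = filtro_tipo_servico_out_in_alt xs := by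
  induction xs with
  | nil => simp [filtroGoA, filtro_tipo_servico_out_in_alt, PySem.List.index?]
  | cons x xs ih =>
    by_cases hout : x = "OUT"
    · subst hout
      unfold filtro_tipo_servico_out_in_alt
      rw [PySem.List.index?_cons_self]
      dsimp only
      rw [PySem.List.slice_from_natCast]
      simp [filtroGoA, filtroGoA_true]
    · have h2 : PySem.List.index? (x :: xs) "OUT" =
          (PySem.List.index? xs "OUT").map (· + 1) :=
        PySem.List.index?_cons_of_ne xs hout
      have hx : (x == "OUT") = false := by simp [hout]
      simp only [filtroGoA, hx, Bool.false_eq_true, if_false, Bool.and_false]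
      rw [ih]
      unfold filtro_tipo_servico_out_in_alt
      rw [h2]
      cases hidx : PySem.List.index? xs "OUT" with
      | none => simp
      | some i =>
        simp only [Option.map_some]
        rw [PySem.List.slice_from_natCast, PySem.List.slice_from_natCast]
        simp [List.drop_succ_cons]

-- ===== VERDICT (by name: the statement is the Claim_ definition above) =====
theorem filtro_tipo_servico_out_in_spec : Claim_equal_filtro_tipo_servico_out_in := by
  intro lista _
  unfold Spec_filtro_tipo_servico_out_in filtro_tipo_servico_out_in
  exact filtroGoA_false_eq_alt lista
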